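-- pv_equiv track=rewrite | github.com/ivanvikvik/Stage10FeedbackProject | task031o.py | equal_digits
-- ===== SOURCE A (Python) =====
-- def equal_digits(num):
--     num = abs(num)
--
--     first_digit = num % 10
--     num //= 10
--
--     while num > 0:
--         second_digit = num % 10
--
--         if first_digit != second_digit:
--             return False
--
--         num //= 10
--
--     return True
-- ===== SOURCE B (Python) =====
-- def equal_digits(num):
--     s = str(abs(num))
--     return len(set(s)) == 1
-- ===== Notes on version B (the rewrite author's own statement) =====
-- stated objective: simpler
-- what changed: Replaces the modular digit-extraction while-loop with a single check that the decimal string of |num| contains only one distinct character (len(set(str(abs(num)))) == 1).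
import Mathlib
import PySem

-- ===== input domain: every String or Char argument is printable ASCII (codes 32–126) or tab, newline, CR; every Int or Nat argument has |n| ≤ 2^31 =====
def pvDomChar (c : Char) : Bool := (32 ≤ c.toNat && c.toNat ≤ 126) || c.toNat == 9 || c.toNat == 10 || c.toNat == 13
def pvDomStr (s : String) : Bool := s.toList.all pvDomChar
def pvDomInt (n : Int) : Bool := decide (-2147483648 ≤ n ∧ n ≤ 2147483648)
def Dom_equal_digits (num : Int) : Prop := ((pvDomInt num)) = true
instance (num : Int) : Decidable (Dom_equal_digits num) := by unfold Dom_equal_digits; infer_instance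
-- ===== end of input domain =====

-- B replaces A's modular digit-extraction loop with a one-distinct-character check on the decimal string of |num| (objective: simpler).


-- ===== PORT A =====
-- the 'while num > 0' loop of A, carrying the loop state (first_digit, num)
def pvEqLoop (first : Int) (num : Int) : Bool :=
  if h : 0 < num then
    let second := PySem.Int.mod num 10
    if first ≠ second then false
    else pvEqLoop first (PySem.Int.floordiv num 10)
  else true
termination_by num.toNat
decreasing_by
  rw [PySem.Int.floordiv_eq_ediv_of_pos (by norm_num)]
  omega

def equal_digits (num : Int) : Bool :=
  let num1 := |num|
  let first_digit := PySem.Int.mod num1 10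
  pvEqLoop first_digit (PySem.Int.floordiv num1 10)

-- ===== PORT B =====
def equal_digits_alt (num : Int) : Bool :=
  let s := PySem.Int.toStr |num|
  PySem.Set.len (PySem.Set.ofList s.toList) == 1

-- ===== PRECONDITION & SPEC =====
def Spec_equal_digits (num : Int) (out : Bool) : Prop := out = equal_digits_alt num
instance (num : Int) (out : Bool) : Decidable (Spec_equal_digits num out) := by unfold Spec_equal_digits; infer_instance

-- ===== CLAIM (what is proved, stated in full; the proofs are below) =====
def Claim_equal_equal_digits : Prop := ∀ (num : Int), Dom_equal_digits num → Spec_equal_digits num (equal_digits num)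

-- ===== LEMMAS AND PROOFS =====

-- core's toDigitsCore, with enough fuel, is the reversed digit-character list
lemma pv_toDigitsCore_eq (f : Nat) : ∀ (n : Nat) (acc : List Char), n ≠ 0 → n ≤ f →
    Nat.toDigitsCore 10 f n acc = ((Nat.digits 10 n).map Nat.digitChar).reverse ++ acc := by
  induction f with
  | zero => intro n acc h0 hf; omega
  | succ f ih =>
    intro n acc h0 hf
    rw [Nat.toDigitsCore]
    rw [Nat.digits_def' (by norm_num) (Nat.pos_of_ne_zero h0)]
    by_cases hq : n / 10 = 0
    · simp [hq, Nat.digits_zero]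
    · simp only [hq, if_false]
      rw [ih (n / 10) _ hq (by omega)]
      simp

-- A's loop returns true iff every remaining digit equals first
lemma pv_eqLoop_eq (first : Int) : ∀ (n : Int), 0 ≤ n →
    pvEqLoop first n = (Nat.digits 10 n.toNat).all (fun d => first == (d : Int)) := by
  intro n hn
  induction hk : n.toNat using Nat.strong_induction_on generalizing n with
  | _ m ih =>
    rw [pvEqLoop]
    by_cases hpos : 0 < n
    · have hm : 0 < m := by omega
      rw [Nat.digits_def' (b := 10) (by norm_num) (by omega)]
      have hmod : PySem.Int.mod n 10 = ((m % 10 : Nat) : Int) := by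
        rw [PySem.Int.mod_eq_emod_of_pos (show (0:Int) < 10 by norm_num)]
        omega
      have hdiv : PySem.Int.floordiv n 10 = ((m / 10 : Nat) : Int) := by
        rw [PySem.Int.floordiv_eq_ediv_of_pos (show (0:Int) < 10 by norm_num)]
        omega
      simp only [hpos, dif_pos]
      rw [hmod, hdiv, ih (m / 10) (by omega) _ (by positivity) (by omega), List.all_cons]
      by_cases he : first = ((m % 10 : Nat) : Int)
      · simp [he]
      · simp [beq_eq_decide]
    · have : m = 0 := by omega
      simp [hpos, this]

-- a Python set of a list has exactly one element iff the list is nonempty with all elements equal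
lemma pv_setLen_one_iff (l : List Char) :
    (PySem.Set.ofList l).length = 1 ↔ l ≠ [] ∧ ∀ x ∈ l, ∀ y ∈ l, x = y := by
  constructor
  · intro h
    obtain ⟨a, ha⟩ := List.length_eq_one_iff.mp h
    have hmem : ∀ x ∈ l, x = a := by
      intro x hx
      have : x ∈ PySem.Set.ofList l := (PySem.Set.mem_ofList l x).mpr hx
      rw [ha] at this; simpa using this
    refine ⟨?_, fun x hx y hy => (hmem x hx).trans (hmem y hy).symm⟩
    rintro rfl
    simp [PySem.Set.ofList, PySem.Set.empty] at ha
  · rintro ⟨hne, hall⟩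
    obtain ⟨a, t, rfl⟩ := List.exists_cons_of_ne_nil hne
    have hmem : ∀ x ∈ PySem.Set.ofList (a :: t), x = a := by
      intro x hx
      have := (PySem.Set.mem_ofList (a :: t) x).mp hx
      exact hall x this a (by simp)
    have hnd := PySem.Set.nodup_ofList (a :: t)
    have hane : PySem.Set.ofList (a :: t) ≠ [] := by
      intro hnil
      have : a ∈ PySem.Set.ofList (a :: t) := (PySem.Set.mem_ofList _ a).mpr (by simp)
      rw [hnil] at this; simp at this
    obtain ⟨b, u, hbu⟩ := List.exists_cons_of_ne_nil hane
    rw [hbu]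
    rcases u with _ | ⟨c, v⟩
    · rfl
    · exfalso
      have hb : b = a := hmem b (by rw [hbu]; simp)
      have hc : c = a := hmem c (by rw [hbu]; simp)
      rw [hbu] at hnd
      simp [hb, hc] at hnd

lemma pv_digitChar_inj : ∀ a < 10, ∀ b < 10, Nat.digitChar a = Nat.digitChar b → a = b := by decide

-- ===== VERDICT (by name: the statement is the Claim_ definition above) =====
theorem equal_digits_spec : Claim_equal_equal_digits := by
  intro num _
  unfold Spec_equal_digits equal_digits equal_digits_alt
  set m : Nat := num.natAbs with hm
  have habs : |num| = (m : Int) := by rw [hm, Int.abs_eq_natAbs]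
  rw [habs]
  show pvEqLoop (PySem.Int.mod (m : Int) 10) (PySem.Int.floordiv (m : Int) 10)
      = (PySem.Set.len (PySem.Set.ofList (PySem.Int.toStr (m : Int)).toList) == 1)
  have hmod : PySem.Int.mod (m : Int) 10 = ((m % 10 : Nat) : Int) := by
    rw [PySem.Int.mod_eq_emod_of_pos (show (0:Int) < 10 by norm_num)]; omega
  have hdiv : PySem.Int.floordiv (m : Int) 10 = ((m / 10 : Nat) : Int) := by
    rw [PySem.Int.floordiv_eq_ediv_of_pos (show (0:Int) < 10 by norm_num)]; omega
  rw [hmod, hdiv, pv_eqLoop_eq _ _ (by positivity)]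
  -- B side: the characters of str(m)
  have hchars : (PySem.Int.toStr (m : Int)).toList = Nat.toDigits 10 m := by
    rw [PySem.Int.toList_toStr]
    simp [PySem.Int.toChars]
  rw [hchars]
  by_cases hm0 : m = 0
  · simp only [hm0]; decide
  · have htd : Nat.toDigits 10 m = ((Nat.digits 10 m).map Nat.digitChar).reverse := by
      have := pv_toDigitsCore_eq (m + 1) m [] hm0 (by omega)
      simpa [Nat.toDigits] using this
    rw [htd]
    have hdig : Nat.digits 10 m = m % 10 :: Nat.digits 10 (m / 10) :=
      Nat.digits_def' (by norm_num) (Nat.pos_of_ne_zero hm0)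
    rw [Bool.eq_iff_iff]
    rw [List.all_eq_true]
    have hlen : (PySem.Set.len (PySem.Set.ofList (((Nat.digits 10 m).map Nat.digitChar).reverse)) == 1) = true
        ↔ (PySem.Set.ofList (((Nat.digits 10 m).map Nat.digitChar).reverse)).length = 1 := by
      simp [PySem.Set.len]
    rw [hlen, pv_setLen_one_iff]
    constructor
    · intro hall
      refine ⟨by simp [hdig], ?_⟩
      intro x hx y hy
      simp only [List.mem_reverse, List.mem_map] at hx hy
      obtain ⟨dx, hdx, rfl⟩ := hx
      obtain ⟨dy, hdy, rfl⟩ := hy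
      have : dx = dy := by
        have hx' : dx = m % 10 ∨ dx ∈ Nat.digits 10 (m / 10) := by rw [hdig] at hdx; simpa using hdx
        have hy' : dy = m % 10 ∨ dy ∈ Nat.digits 10 (m / 10) := by rw [hdig] at hdy; simpa using hdy
        have key : ∀ d ∈ Nat.digits 10 (m / 10), d = m % 10 := by
          intro d hd
          have h2 := hall d (by simpa using hd)
          simp only [beq_iff_eq] at h2
          exact_mod_cast h2.symm
        rcases hx' with rfl | hx' <;> rcases hy' with rfl | hy'
        · rfl
        · exact (key dy hy').symm
        · exact key dx hx'
        · rw [key dx hx', key dy hy']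
      rw [this]
    · rintro ⟨-, hall⟩
      intro d hd
      have hd' : d ∈ Nat.digits 10 ((m : Int).toNat / 10) := hd
      simp only [Int.toNat_natCast] at hd'
      have hdm : Nat.digitChar d = Nat.digitChar (m % 10) := by
        apply hall
        · simp only [List.mem_reverse, List.mem_map]
          exact ⟨d, by rw [hdig]; simp [hd'], rfl⟩
        · simp only [List.mem_reverse, List.mem_map]
          exact ⟨m % 10, by rw [hdig]; simp, rfl⟩
      have hdlt : d < 10 := Nat.digits_lt_base (by norm_num) (by rw [hdig]; simp [hd'])
      have := pv_digitChar_inj d hdlt (m % 10) (by omega) hdm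
      simp [this]
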